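-- pv_equiv track=rewrite | github.com/NerdyGuy109/Games | Hangman.py | get_blankstring
-- ===== SOURCE A (Python) =====
-- def get_blankstring(word):
--     output = ""
--     for char in word:
--         if char in alphabet:
--             output += "_"
--         if char == " ":
--             output += " "
--     return output
--
-- alphabet = "a b c d e f g h i j k l m n o p q r s t u v w x y z".split()
-- ===== SOURCE B (Python) =====
-- alphabet = "a b c d e f g h i j k l m n o p q r s t u v w x y z".split()
--
-- def get_blankstring(word):
--     return " ".join("_" * sum(1 for c in seg if c in alphabet)
--                     for seg in word.split(" "))
-- ===== Notes on version B (the rewrite author's own statement) =====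
-- stated objective: idiomatic
-- what changed: Replaces the character-by-character accumulator loop with two if-branches by a split-on-space / count-per-segment / join decomposition: each space-separated segment becomes a run of underscores (one per lowercase letter) and ' '.join rebuilds the spaces.
import Mathlib
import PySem

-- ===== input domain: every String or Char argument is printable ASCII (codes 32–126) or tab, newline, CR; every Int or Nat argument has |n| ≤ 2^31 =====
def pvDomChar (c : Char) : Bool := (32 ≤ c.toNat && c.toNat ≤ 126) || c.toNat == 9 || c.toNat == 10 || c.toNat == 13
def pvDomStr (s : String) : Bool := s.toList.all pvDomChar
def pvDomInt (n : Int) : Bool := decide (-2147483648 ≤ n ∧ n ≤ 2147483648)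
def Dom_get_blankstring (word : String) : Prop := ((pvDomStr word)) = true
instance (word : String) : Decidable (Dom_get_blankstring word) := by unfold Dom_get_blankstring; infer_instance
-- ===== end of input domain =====

-- B replaces A's char-by-char accumulator loop by a split-on-space / count-per-segment / join decomposition (objective: idiomatic).

-- module constant: alphabet = "a b ... z".split()
def pvAlphabet : List String :=
  PySem.Str.split₀ "a b c d e f g h i j k l m n o p q r s t u v w x y z"

-- ===== PORT A =====
def get_blankstring (word : String) : String :=
  String.mk <| word.toList.foldl (fun output char =>
    let output1 := if pvAlphabet.contains (String.mk [char]) then output ++ ['_'] else output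
    if char == ' ' then output1 ++ [' '] else output1) []

-- ===== PORT B =====
def get_blankstring_alt (word : String) : String :=
  String.mk <| PySem.Chars.join [' '] <|
    (PySem.Chars.splitOn word.toList [' ']).map
      (fun seg => List.replicate (seg.countP (fun c => pvAlphabet.contains (String.mk [c]))) '_')

-- ===== PRECONDITION & SPEC =====
def Spec_get_blankstring (word : String) (out : String) : Prop := out = get_blankstring_alt word
instance (word : String) (out : String) : Decidable (Spec_get_blankstring word out) := by unfold Spec_get_blankstring; infer_instance

-- ===== CLAIM (what is proved, stated in full; the proofs are below) =====
def Claim_equal_get_blankstring : Prop := ∀ (word : String), Dom_get_blankstring word → Spec_get_blankstring word (get_blankstring word)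

-- ===== LEMMAS AND PROOFS =====

def pvInA (c : Char) : Bool := pvAlphabet.contains (String.mk [c])

-- the common character-wise description of the output
def pvG : List Char → List Char
  | [] => []
  | c :: cs => (if pvInA c then ['_'] else []) ++ (if c == ' ' then [' '] else []) ++ pvG cs

lemma pvA_fold (cs : List Char) : ∀ acc : List Char,
    cs.foldl (fun output char =>
      let output1 := if pvAlphabet.contains (String.mk [char]) then output ++ ['_'] else output
      if char == ' ' then output1 ++ [' '] else output1) acc = acc ++ pvG cs := by
  induction cs with
  | nil => intro acc; simp [pvG]
  | cons c cs ih =>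
    intro acc
    simp only [List.foldl_cons, ih, pvG, pvInA]
    split_ifs <;> simp_all

-- natural recursive split on a single space
def pvSplitSp : List Char → List (List Char)
  | [] => [[]]
  | c :: cs =>
    if c = ' ' then [] :: pvSplitSp cs
    else match pvSplitSp cs with
      | [] => [[c]]
      | s :: ss => (c :: s) :: ss

lemma pvSplitSp_ne_nil (cs : List Char) : pvSplitSp cs ≠ [] := by
  cases cs with
  | nil => simp [pvSplitSp]
  | cons c cs =>
    simp only [pvSplitSp]
    split_ifs
    · simp
    · split <;> simp

lemma pvGo_spec : ∀ (fuel : Nat) (l : List Char), l.length ≤ fuel → ∀ (cur : List Char) (acc : List (List Char)),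
    PySem.Chars.splitOn.go [' '] fuel l cur acc =
      acc.reverse ++ (match pvSplitSp l with
        | [] => [cur.reverse]
        | s :: ss => (cur.reverse ++ s) :: ss) := by
  intro fuel
  induction fuel with
  | zero =>
    intro l hl cur acc
    have : l = [] := by cases l <;> simp_all
    subst this
    simp [PySem.Chars.splitOn.go, pvSplitSp]
  | succ n ih =>
    intro l hl cur acc
    cases l with
    | nil => simp [PySem.Chars.splitOn.go, pvSplitSp]
    | cons c rest =>
      by_cases hc : c = ' '
      · subst hc
        have hstep : PySem.Chars.splitOn.go [' '] (n + 1) (' ' :: rest) cur acc =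
            PySem.Chars.splitOn.go [' '] n rest [] (cur.reverse :: acc) := by
          simp [PySem.Chars.splitOn.go, List.isPrefixOf]
        rw [hstep, ih rest (by simpa using Nat.le_of_succ_le_succ hl)]
        cases h : pvSplitSp rest with
        | nil => exact absurd h (pvSplitSp_ne_nil rest)
        | cons s ss => simp [pvSplitSp, h]
      · have hstep : PySem.Chars.splitOn.go [' '] (n + 1) (c :: rest) cur acc =
            PySem.Chars.splitOn.go [' '] n rest (c :: cur) acc := by
          simp [PySem.Chars.splitOn.go, List.isPrefixOf, Ne.symm hc]
        rw [hstep, ih rest (by simpa using Nat.le_of_succ_le_succ hl)]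
        cases h : pvSplitSp rest with
        | nil => exact absurd h (pvSplitSp_ne_nil rest)
        | cons s ss => simp [pvSplitSp, h, hc]

lemma pvSplitOn_eq (l : List Char) : PySem.Chars.splitOn l [' '] = pvSplitSp l := by
  unfold PySem.Chars.splitOn
  rw [pvGo_spec (l.length + 1) l (by omega) [] []]
  cases h : pvSplitSp l with
  | nil => exact absurd h (pvSplitSp_ne_nil l)
  | cons s ss => simp

def pvH (seg : List Char) : List Char := List.replicate (seg.countP (fun c => pvAlphabet.contains (String.mk [c]))) '_'

lemma pvH_cons (c : Char) (s : List Char) :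
    pvH (c :: s) = (if pvInA c then ['_'] else []) ++ pvH s := by
  simp only [pvH, pvInA, List.countP_cons]
  split_ifs with h <;> simp [h, List.replicate_succ]

lemma pvJoin_cons (x : List Char) (xs : List (List Char)) :
    PySem.Chars.join [' '] (x :: xs) =
      x ++ (if xs = [] then [] else [' '] ++ PySem.Chars.join [' '] xs) := by
  cases xs with
  | nil => simp [PySem.Chars.join, List.intercalate]
  | cons y ys => simp [PySem.Chars.join, List.intercalate, List.intersperse]

lemma pvB_eq_g (l : List Char) :
    PySem.Chars.join [' '] ((pvSplitSp l).map pvH) = pvG l := by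
  induction l with
  | nil => simp [pvSplitSp, pvH, pvG, pvJoin_cons]
  | cons c cs ih =>
    by_cases hc : c = ' '
    · subst hc
      have hspace : pvInA ' ' = false := by decide
      rw [show pvSplitSp (' ' :: cs) = [] :: pvSplitSp cs from by simp [pvSplitSp]]
      rw [List.map_cons, pvJoin_cons]
      have hne : (pvSplitSp cs).map pvH ≠ [] := by
        simp [pvSplitSp_ne_nil cs]
      simp only [pvH, List.countP_nil, List.replicate_zero, List.nil_append, if_neg hne, ih,
        pvG, hspace]
      simp
    · cases h : pvSplitSp cs with
      | nil => exact absurd h (pvSplitSp_ne_nil cs)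
      | cons s ss =>
        rw [show pvSplitSp (c :: cs) = (c :: s) :: ss from by simp [pvSplitSp, hc, h]]
        rw [List.map_cons, pvJoin_cons, pvH_cons]
        rw [h, List.map_cons, pvJoin_cons] at ih
        simp only [pvG, hc, if_neg, beq_iff_eq]
        rw [← ih]
        simp [hc]

-- ===== VERDICT (by name: the statement is the Claim_ definition above) =====
theorem get_blankstring_spec : Claim_equal_get_blankstring := by
  intro word _
  show get_blankstring word = get_blankstring_alt word
  have h : get_blankstring_alt word =
      String.mk (PySem.Chars.join [' '] ((PySem.Chars.splitOn word.toList [' ']).map pvH)) := rfl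
  rw [h, pvSplitOn_eq, pvB_eq_g]
  unfold get_blankstring
  rw [pvA_fold word.toList []]
  simp
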